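-- pv_equiv track=rewrite | github.com/TheMetaSetter/sudo-code-2025 | preprocess/data_cleaner.py | clean_topic_field
-- ===== SOURCE A (Python) =====
-- def clean_topic_field(topic_field: dict, topics_dictionary: dict) -> str:
--     """
--     This function will clean the topic field of each item in the dataset.
--
--     Return:
--         - An item with a clean topic field.
--     """
--
--     # Loop over keys in the topics_dictionary
--     # If the topic_field is inside the list of a key
--     # Replace the topic_field by that key
--     # Note: A key is a large topic and topic_field, at start, is a small topic.
--     found = False
--     for key in topics_dictionary.keys():
--         if topic_field in topics_dictionary[key]:
--             topic_field = key
--             found = True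
--
--     if found == False:
--         topic_field = "unknown"
--     else:
--         topic_field = topic_field.lower()
--
--     return topic_field
-- ===== SOURCE B (Python) =====
-- def clean_topic_field(topic_field: dict, topics_dictionary: dict) -> str:
--     # Build a reverse lookup table small topic -> large topic once,
--     # then answer with a single dictionary lookup.
--     reverse = {}
--     for key, small_topics in topics_dictionary.items():
--         for small in small_topics:
--             reverse[small] = key
--     if topic_field in reverse:
--         return reverse[topic_field].lower()
--     return "unknown"
-- ===== Notes on version B (the rewrite author's own statement) =====
-- stated objective: idiomatic
-- what changed: Builds a reverse-lookup dict (small topic -> key) once and answers with a single lookup instead of A's per-key membership scans with in-place replacement of topic_field; Pre_ excludes inputs where topic_field is listed under two different keys or its matching key occurs in a later key's topic list, on which A's chained in-place replacement and B's reverse lookup are both defensible readings of an ambiguous mapping.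
-- outside the precondition, e.g. on clean_topic_field('a', {'k1': ['a'], 'k2': ['k1']}): A returns 'k2', B returns 'k1'; on clean_topic_field('a', {'k1': ['a'], 'k2': ['a']}): A returns 'k1', B returns 'k2'
import Mathlib
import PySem

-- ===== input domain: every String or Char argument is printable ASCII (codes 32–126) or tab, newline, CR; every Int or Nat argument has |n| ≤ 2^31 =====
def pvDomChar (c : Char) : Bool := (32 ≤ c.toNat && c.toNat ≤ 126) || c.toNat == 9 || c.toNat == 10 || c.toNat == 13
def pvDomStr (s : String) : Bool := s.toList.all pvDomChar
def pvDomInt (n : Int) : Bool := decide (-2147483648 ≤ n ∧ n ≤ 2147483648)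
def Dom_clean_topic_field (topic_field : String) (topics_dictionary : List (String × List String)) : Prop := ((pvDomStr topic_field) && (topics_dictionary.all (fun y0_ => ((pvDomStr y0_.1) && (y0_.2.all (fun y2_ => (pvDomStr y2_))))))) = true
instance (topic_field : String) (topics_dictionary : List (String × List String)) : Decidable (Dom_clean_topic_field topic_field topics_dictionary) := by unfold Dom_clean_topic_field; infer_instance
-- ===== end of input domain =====

-- B builds a reverse lookup dict (small topic -> key) once and answers with a single lookup, replacing A's per-key membership scans with in-place replacement of topic_field.


-- ===== PORT A =====
-- found=False; for key in d.keys(): if topic_field in d[key]: topic_field=key; found=True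
-- (the assoc list represents a Python dict with distinct keys: iterating its pairs = keys()+lookup)
def clean_topic_field (topic_field : String) (topics_dictionary : List (String × List String)) : String :=
  let st := topics_dictionary.foldl
    (fun (s : String × Bool) kv => if s.1 ∈ kv.2 then (kv.1, true) else s)
    (topic_field, false)
  if st.2 = false then "unknown" else PySem.Str.lower st.1

-- ===== PORT B =====
-- reverse = {}; for key, small_topics in d.items(): for small in small_topics: reverse[small] = key
-- if topic_field in reverse: return reverse[topic_field].lower(); return "unknown"
def clean_topic_field_alt (topic_field : String) (topics_dictionary : List (String × List String)) : String :=
  let reverse := topics_dictionary.foldl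
    (fun (r : PySem.Dict String String) kv => kv.2.foldl (fun r small => r.insert small kv.1) r)
    PySem.Dict.empty
  match reverse.get? topic_field with
  | some k => PySem.Str.lower k
  | none => "unknown"

-- ===== PRECONDITION & SPEC =====
-- Pre_ excludes inputs on which topic_field is listed under two different keys (an ambiguous
-- mapping: A's in-place scan and B's overwriting reverse lookup pick different keys) or the
-- key matching topic_field itself occurs in a later key's topic list (A then chains its
-- in-place replacement through keys); on such degenerate inputs either answer is defensible.
def Pre_clean_topic_field (topic_field : String) (topics_dictionary : List (String × List String)) : Prop :=
  topics_dictionary.Pairwise (fun a b => topic_field ∈ a.2 → topic_field ∉ b.2 ∧ a.1 ∉ b.2)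
instance (topic_field : String) (topics_dictionary : List (String × List String)) : Decidable (Pre_clean_topic_field topic_field topics_dictionary) := by unfold Pre_clean_topic_field; infer_instance
def pvWitness_clean_topic_field : String × (List (String × List String)) :=
  ("Math", [("Science", ["Physics", "Math"]), ("Arts", ["Music"])])

def Spec_clean_topic_field (topic_field : String) (topics_dictionary : List (String × List String)) (out : String) : Prop := out = clean_topic_field_alt topic_field topics_dictionary
instance (topic_field : String) (topics_dictionary : List (String × List String)) (out : String) : Decidable (Spec_clean_topic_field topic_field topics_dictionary out) := by unfold Spec_clean_topic_field; infer_instance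

-- ===== CLAIM (what is proved, stated in full; the proofs are below) =====
def Claim_equal_clean_topic_field : Prop := ∀ (topic_field : String) (topics_dictionary : List (String × List String)), Dom_clean_topic_field topic_field topics_dictionary → Pre_clean_topic_field topic_field topics_dictionary → Spec_clean_topic_field topic_field topics_dictionary (clean_topic_field topic_field topics_dictionary)

-- ===== LEMMAS AND PROOFS =====

-- A's fold leaves the state unchanged when the current value occurs in no list
theorem foldA_stay (l : List (String × List String)) (cur : String) (b : Bool)
    (h : ∀ kv ∈ l, cur ∉ kv.2) :
    l.foldl (fun (s : String × Bool) kv => if s.1 ∈ kv.2 then (kv.1, true) else s) (cur, b)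
      = (cur, b) := by
  induction l with
  | nil => rfl
  | cons kv rest ih =>
    simp only [List.foldl_cons]
    rw [if_neg (h kv List.mem_cons_self)]
    exact ih (fun kv' h' => h kv' (List.mem_cons_of_mem _ h'))

-- under Pre_, A's fold finds the (unique) entry containing topic_field, if any
theorem foldA_eq (l : List (String × List String)) (tf : String)
    (h : l.Pairwise (fun a b => tf ∈ a.2 → tf ∉ b.2 ∧ a.1 ∉ b.2)) :
    l.foldl (fun (s : String × Bool) kv => if s.1 ∈ kv.2 then (kv.1, true) else s) (tf, false)
      = (match l.find? (fun kv => decide (tf ∈ kv.2)) with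
         | some kv => (kv.1, true)
         | none => (tf, false)) := by
  induction l with
  | nil => rfl
  | cons kv rest ih =>
    rcases List.pairwise_cons.mp h with ⟨hkv, hrest⟩
    simp only [List.foldl_cons]
    by_cases hm : tf ∈ kv.2
    · rw [if_pos hm, foldA_stay rest kv.1 true (fun kv' h' => (hkv kv' h' hm).2)]
      rw [List.find?_cons_of_pos (by simpa using hm)]
    · rw [if_neg hm, ih hrest, List.find?_cons_of_neg (by simpa using hm)]

-- inner fold of B: inserting every small topic of one entry
theorem foldB_inner (vs : List String) (k tf : String) :
    ∀ r : PySem.Dict String String,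
    ((vs.foldl (fun r small => r.insert small k) r).get? tf)
      = if tf ∈ vs then some k else r.get? tf := by
  induction vs with
  | nil => intro r; simp
  | cons v vs ih =>
    intro r
    simp only [List.foldl_cons]
    rw [ih]
    by_cases hv : tf ∈ vs
    · simp [hv]
    · by_cases htv : tf = v
      · subst htv; simp [hv, PySem.Dict.get?_insert_self]
      · simp [hv, htv, PySem.Dict.get?_insert_of_ne _ _ htv]

-- outer fold of B, when tf occurs in at most one list: the first entry containing tf decides
theorem foldB_eq (l : List (String × List String)) (tf : String) :
    ∀ r : PySem.Dict String String,
    l.Pairwise (fun a b => tf ∈ a.2 → tf ∉ b.2) →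
    ((l.foldl (fun (r : PySem.Dict String String) kv =>
        kv.2.foldl (fun r small => r.insert small kv.1) r) r).get? tf)
      = (match l.find? (fun kv => decide (tf ∈ kv.2)) with
         | some kv => some kv.1
         | none => r.get? tf) := by
  induction l with
  | nil => intro r _; rfl
  | cons kv rest ih =>
    intro r h
    rcases List.pairwise_cons.mp h with ⟨hkv, hrest⟩
    simp only [List.foldl_cons]
    rw [ih _ hrest]
    by_cases hm : tf ∈ kv.2
    · rw [List.find?_cons_of_pos (by simpa using hm)]
      have hnone : rest.find? (fun kv => decide (tf ∈ kv.2)) = none := by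
        apply List.find?_eq_none.mpr
        intro kv' h'
        simpa using hkv kv' h' hm
      rw [hnone, foldB_inner kv.2 kv.1 tf r, if_pos hm]
    · rw [List.find?_cons_of_neg (by simpa using hm)]
      cases hfind : rest.find? (fun kv => decide (tf ∈ kv.2)) with
      | some kv' => rfl
      | none => rw [foldB_inner kv.2 kv.1 tf r, if_neg hm]

-- ===== VERDICT (by name: the statement is the Claim_ definition above) =====
theorem clean_topic_field_spec : Claim_equal_clean_topic_field := by
  intro tf d _ hpre
  unfold Spec_clean_topic_field clean_topic_field clean_topic_field_alt
  simp only [foldA_eq d tf hpre,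
      foldB_eq d tf PySem.Dict.empty (hpre.imp (fun h ht => (h ht).1))]
  cases hfind : d.find? (fun kv => decide (tf ∈ kv.2)) <;> simp
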